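-- pv_equiv track=rewrite | github.com/glopezv95/django-iso14001 | app/views.py | format_num
-- ===== SOURCE A (Python) =====
-- def format_num(num_list:list):
--
--     formatted_nums = []
--
--     for num in num_list:
--         formatted_num = num[::-1]
--
--         for i in range(len(formatted_num)):
--             if i % 3 == 0 and i != 0:
--                 formatted_num = num[::-1][:i] + ' ' + num[::-1][i:]
--
--         formatted_nums.append(formatted_num[::-1])
--
--     return formatted_nums
-- ===== SOURCE B (Python) =====
-- def format_num(num_list: list):
--     out = []
--     for num in num_list:
--         n = len(num)
--         if n <= 3:
--             out.append(num)
--         else: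
--             p = n - 3 * ((n - 1) // 3)
--             out.append(num[:p] + ' ' + num[p:])
--     return out
-- ===== Notes on version B (the rewrite author's own statement) =====
-- stated objective: faster
-- what changed: A reverses each string and loops over all indices, rebuilding the spliced reversed string from scratch at every third index (only the last rebuild survives); B computes the single surviving split position p = n - 3*((n-1)//3) in closed form and does one splice per string.
import Mathlib
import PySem

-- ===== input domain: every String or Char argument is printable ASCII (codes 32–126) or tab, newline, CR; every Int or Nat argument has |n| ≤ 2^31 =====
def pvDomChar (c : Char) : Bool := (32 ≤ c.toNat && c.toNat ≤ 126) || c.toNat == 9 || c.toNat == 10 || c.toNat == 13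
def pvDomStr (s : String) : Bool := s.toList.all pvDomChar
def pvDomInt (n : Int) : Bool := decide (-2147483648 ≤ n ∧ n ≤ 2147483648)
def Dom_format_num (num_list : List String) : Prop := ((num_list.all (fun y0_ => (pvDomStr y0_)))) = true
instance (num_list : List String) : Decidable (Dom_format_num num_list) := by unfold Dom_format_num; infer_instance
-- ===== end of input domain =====

-- B replaces A's quadratic loop of repeated re-slicings (only the last of which survives)
-- by one closed-form split position per string; measurably faster on long strings.

-- ===== PORT A =====
-- one string of A's loop body: repeatedly overwrite formatted_num from num[::-1]
def formatOneA (num : String) : String :=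
  let s := num.toList.reverse              -- num[::-1]
  let f := (List.range s.length).foldl
    (fun acc i => if i % 3 == 0 && i != 0 then s.take i ++ ' ' :: s.drop i else acc) s
  String.ofList f.reverse                      -- formatted_num[::-1]

def format_num (num_list : List String) : List String :=
  num_list.foldl (fun acc num => acc ++ [formatOneA num]) []

-- ===== PORT B =====
def format_num_alt (num_list : List String) : List String :=
  num_list.map (fun num =>
    let t := num.toList
    let n := t.length
    if n ≤ 3 then num
    else
      let p := n - 3 * ((n - 1) / 3)
      String.ofList (t.take p ++ ' ' :: t.drop p))

-- ===== PRECONDITION & SPEC =====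
def Spec_format_num (num_list : List String) (out : List String) : Prop := out = format_num_alt num_list
instance (num_list : List String) (out : List String) : Decidable (Spec_format_num num_list out) := by unfold Spec_format_num; infer_instance

-- ===== CLAIM (what is proved, stated in full; the proofs are below) =====
def Claim_equal_format_num : Prop := ∀ (num_list : List String), Dom_format_num num_list → Spec_format_num num_list (format_num num_list)

-- ===== LEMMAS AND PROOFS =====

-- A's inner loop: only the last firing index k = 3*((n-1)/3) survives (s untouched if n ≤ 3)
theorem foldA_closed (s : List Char) (n : Nat) :
    (List.range n).foldl
      (fun acc i => if i % 3 == 0 && i != 0 then s.take i ++ ' ' :: s.drop i else acc) s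
    = if n ≤ 3 then s else
        let k := 3 * ((n - 1) / 3); s.take k ++ ' ' :: s.drop k := by
  induction n with
  | zero => simp
  | succ n ih =>
    rw [List.range_succ, List.foldl_append, ih]
    simp only [List.foldl_cons, List.foldl_nil]
    by_cases h : n % 3 = 0 ∧ n ≠ 0
    · have hk : 3 * ((n + 1 - 1) / 3) = n := by omega
      have : (n % 3 == 0 && n != 0) = true := by
        simp [h.1, h.2]
      rw [this]
      have h4 : ¬ (n + 1 ≤ 3) := by omega
      simp only [if_neg h4, hk, if_pos trivial]
    · have : (n % 3 == 0 && n != 0) = false := by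
        rcases Decidable.em (n % 3 = 0) with h1 | h1
        · have : n = 0 := by tauto
          simp [this]
        · simp [h1]
      rw [this]
      simp only [Bool.false_eq_true, if_false]
      by_cases hn : n + 1 ≤ 3
      · rw [if_pos (by omega : n ≤ 3), if_pos hn]
      · have hn3 : ¬ (n ≤ 3) := by
          intro hle
          have : n = 3 := by omega
          subst this; exact h ⟨by norm_num, by norm_num⟩
        rw [if_neg hn3, if_neg hn]
        have : (n + 1 - 1) / 3 = (n - 1) / 3 := by omega
        rw [this]

theorem formatOneA_eq (num : String) :
    formatOneA num =
      (let t := num.toList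
       let n := t.length
       if n ≤ 3 then num
       else
         let p := n - 3 * ((n - 1) / 3)
         String.ofList (t.take p ++ ' ' :: t.drop p)) := by
  unfold formatOneA
  simp only [foldA_closed, List.length_reverse, String.length_toList]
  by_cases h : num.length ≤ 3
  · simp [h, String.ofList_toList]
  · simp only [if_neg h]
    congr 1
    rw [← String.length_toList]
    simp [List.reverse_append, List.reverse_take, List.reverse_drop, List.reverse_reverse]

theorem format_num_spec : Claim_equal_format_num := by
  intro num_list _
  unfold Spec_format_num format_num format_num_alt
  induction num_list with
  | nil => simp
  | cons x xs ih =>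
    simp only [List.map_cons, List.foldl_cons] at *
    rw [show ∀ (l : List String) (acc : List String), l.foldl (fun acc num => acc ++ [formatOneA num]) acc = acc ++ l.map formatOneA from ?_, formatOneA_eq]
    · simp [formatOneA_eq]
    · intro l
      induction l with
      | nil => simp
      | cons y ys ihy => intro acc; simp [ihy]
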